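-- pv_equiv track=rewrite | github.com/LeviGibson/eggnog-chess-engine | moveOrder/main.py | read_evaluations
-- ===== SOURCE A (Python) =====
-- def read_evaluations(line):
--     new = ""
--     inComment = False
--
--     for ch in line:
--         if ch == '{': inComment = True
--
--         if not inComment:
--             new += ch
--
--         if ch == '}': inComment = False
--
--     moves = []
--     new = new.split(" ")
--
--     for id, obj in enumerate(new):
--         if not ((obj == '') or ('.' in obj) or (obj[0] == "$") or (obj[-1] == "\n")):
--             moves.append(obj)
--
--     return moves
-- ===== SOURCE B (Python) =====
-- def read_evaluations(line):
--     moves = []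
--     buf = []
--     inComment = False
--
--     def flush():
--         tok = ''.join(buf)
--         if tok and '.' not in tok and tok[0] != '$' and not tok.endswith('\n'):
--             moves.append(tok)
--
--     for ch in line:
--         if ch == '{':
--             inComment = True
--         elif inComment:
--             if ch == '}':
--                 inComment = False
--         elif ch == ' ':
--             flush()
--             buf = []
--         else:
--             buf.append(ch)
--     flush()
--     return moves
-- ===== Notes on version B (the rewrite author's own statement) =====
-- stated objective: alternative
-- what changed: Replaced A's three sequential passes (build a comment-stripped string by repeated concatenation, split it on spaces, then filter the pieces in an enumerate loop) by a single character-by-character tokenizer that keeps a comment flag and a token buffer and tests/emits each token as it is flushed, never materialising the stripped string or the split list.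
import Mathlib
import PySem

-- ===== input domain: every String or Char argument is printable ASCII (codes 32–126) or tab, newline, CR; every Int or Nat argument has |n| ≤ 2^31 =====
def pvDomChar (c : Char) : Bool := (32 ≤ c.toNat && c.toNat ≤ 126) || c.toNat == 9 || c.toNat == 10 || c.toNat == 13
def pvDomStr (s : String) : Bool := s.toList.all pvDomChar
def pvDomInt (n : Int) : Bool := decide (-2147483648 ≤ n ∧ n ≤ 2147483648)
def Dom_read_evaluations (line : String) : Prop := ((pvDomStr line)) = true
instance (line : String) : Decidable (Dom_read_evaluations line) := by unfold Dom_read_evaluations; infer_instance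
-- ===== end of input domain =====

-- B replaces A's three passes (build a stripped string, split(" "), filter) by a single
-- character-by-character tokenizer with a comment flag and a token buffer (objective: alternative decomposition).


-- ===== PORT A =====
def read_evaluations (line : String) : List String :=
  -- pass 1: strip {...} comments into the string `new`
  let st := line.toList.foldl
    (fun (st : String × Bool) ch =>
      let inC := if ch = '{' then true else st.2
      let new := if !inC then st.1.push ch else st.1
      (new, if ch = '}' then false else inC)) ("", false)
  -- new.split(" "): sep is the nonempty literal " ", so split? is always `some`
  let toks := (PySem.Str.split? st.1 " ").getD []
  -- filter loop over enumerate(new)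
  (PySem.List.enumerate toks 0).foldl
    (fun moves (p : Int × String) =>
      if !(decide (p.2 = "") || PySem.Str.isIn "." p.2 ||
           decide (PySem.Str.pyGet? p.2 0 = some '$') ||
           decide (PySem.Str.pyGet? p.2 (-1) = some '\n'))
      then moves ++ [p.2] else moves) []

-- ===== PORT B =====
-- flush(): test the buffered token and append it if it survives
def pvFlush (moves : List String) (buf : List Char) : List String :=
  let tok := String.ofList buf
  if decide (tok ≠ "") && !(PySem.Str.isIn "." tok) &&
     decide (PySem.Str.pyGet? tok 0 ≠ some '$') && !(PySem.Str.endswith tok "\n")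
  then moves ++ [tok] else moves

-- the single pass: comment flag, token buffer, output accumulator
def pvScan : List Char → Bool → List Char → List String → List String
  | [], _, buf, moves => pvFlush moves buf
  | ch :: t, inC, buf, moves =>
    if ch = '{' then pvScan t true buf moves
    else if inC then pvScan t (!decide (ch = '}')) buf moves
    else if ch = ' ' then pvScan t false [] (pvFlush moves buf)
    else pvScan t false (buf ++ [ch]) moves

def read_evaluations_alt (line : String) : List String :=
  pvScan line.toList false [] []

-- ===== PRECONDITION & SPEC =====
def Spec_read_evaluations (line : String) (out : List String) : Prop := out = read_evaluations_alt line
instance (line : String) (out : List String) : Decidable (Spec_read_evaluations line out) := by unfold Spec_read_evaluations; infer_instance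

-- ===== CLAIM (what is proved, stated in full; the proofs are below) =====
def Claim_equal_read_evaluations : Prop := ∀ (line : String), Dom_read_evaluations line → Spec_read_evaluations line (read_evaluations line)

-- ===== LEMMAS AND PROOFS =====

-- the comment-stripped character sequence (functional description of A's pass 1)
def stripP : List Char → Bool → List Char
  | [], _ => []
  | c :: t, b =>
    let b1 := if c = '{' then true else b
    (if b1 then [] else [c]) ++ stripP t (if c = '}' then false else b1)

-- the flag after A's pass 1
def flagP : List Char → Bool → Bool
  | [], b => b
  | c :: t, b => flagP t (if c = '}' then false else if c = '{' then true else b)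

-- Python split(" ") as a simple structural recursion
def splitSp : List Char → List (List Char)
  | [] => [[]]
  | c :: t =>
    if c = ' ' then [] :: splitSp t
    else match splitSp t with
         | [] => [[c]]
         | h :: r => (c :: h) :: r

def consHead (pre : List Char) : List (List Char) → List (List Char)
  | [] => [pre]
  | h :: r => (pre ++ h) :: r

-- the common token filter, on char lists
def keep (cs : List Char) : Bool :=
  decide (cs ≠ []) && !(cs.contains '.') &&
  decide (cs.head? ≠ some '$') && decide (cs.getLast? ≠ some '\n')

theorem splitSp_ne_nil (l : List Char) : splitSp l ≠ [] := by
  induction l with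
  | nil => simp [splitSp]
  | cons c t ih =>
    simp only [splitSp]
    split
    · simp
    · cases h : splitSp t <;> simp

theorem consHead_nil (ts : List (List Char)) (h : ts ≠ []) : consHead [] ts = ts := by
  cases ts with
  | nil => exact absurd rfl h
  | cons a r => simp [consHead]

theorem consHead_consHead (pre c : List Char) (ts : List (List Char)) (h : ts ≠ []) :
    consHead pre (consHead c ts) = consHead (pre ++ c) ts := by
  cases ts with
  | nil => exact absurd rfl h
  | cons a r => simp [consHead]

-- A's pass 1 computes stripP / flagP
theorem foldA_eq (l : List Char) : ∀ (s0 : String) (b0 : Bool),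
    l.foldl (fun (st : String × Bool) ch =>
      let inC := if ch = '{' then true else st.2
      let new := if !inC then st.1.push ch else st.1
      (new, if ch = '}' then false else inC)) (s0, b0)
    = (s0 ++ String.ofList (stripP l b0), flagP l b0) := by
  induction l with
  | nil =>
    intro s0 b0
    simp [stripP, flagP]
  | cons c t ih =>
    intro s0 b0
    simp only [List.foldl_cons]
    by_cases h1 : c = '{' <;> by_cases h2 : c = '}' <;> by_cases hb : b0 = true <;>
      (rw [show stripP (c :: t) b0 = (if (if c = '{' then true else b0) then ([] : List Char)
              else [c]) ++ stripP t (if c = '}' then false else if c = '{' then true else b0) from rfl,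
          show flagP (c :: t) b0 = flagP t (if c = '}' then false else if c = '{' then true else b0) from rfl]) <;>
      simp only [h1, h2, if_true, if_false, hb] <;>
      simp_all <;>
      (rw [← String.toList_inj]; simp)

-- PySem's splitOn on the single-char separator ' ' is splitSp
theorem splitOn_go_eq (fuel : Nat) : ∀ (l cur : List Char) (acc : List (List Char)),
    l.length ≤ fuel →
    PySem.Chars.splitOn.go [' '] fuel l cur acc
    = acc.reverse ++ consHead cur.reverse (splitSp l) := by
  induction fuel with
  | zero =>
    intro l cur acc h
    have : l = [] := List.eq_nil_of_length_eq_zero (Nat.le_zero.mp h)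
    subst this
    simp [PySem.Chars.splitOn.go, splitSp, consHead]
  | succ n ih =>
    intro l cur acc h
    cases l with
    | nil => simp [PySem.Chars.splitOn.go, splitSp, consHead]
    | cons c rest =>
      simp only [PySem.Chars.splitOn.go]
      by_cases hc : c = ' '
      · subst hc
        have hp : [' '].isPrefixOf (' ' :: rest) = true := by simp [List.isPrefixOf]
        simp only [hp, if_true, List.length_cons, List.length_nil, List.drop_succ_cons,
          List.drop_zero]
        rw [ih rest [] (cur.reverse :: acc) (by simpa using Nat.le_of_succ_le_succ h)]
        rw [show splitSp (' ' :: rest) = [] :: splitSp rest from by simp [splitSp]]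
        cases h' : splitSp rest with
        | nil => exact absurd h' (splitSp_ne_nil rest)
        | cons a r => simp [consHead]
      · have hp : [' '].isPrefixOf (c :: rest) = false := by
          simp [List.isPrefixOf]; exact fun h' => (hc h'.symm).elim
        simp only [hp, Bool.false_eq_true, if_false]
        rw [ih rest (c :: cur) acc (by simpa using Nat.le_of_succ_le_succ h)]
        have : splitSp (c :: rest) = consHead [c] (splitSp rest) := by
          simp only [splitSp, if_neg hc]
          cases h' : splitSp rest <;> simp [consHead]
        rw [this, consHead_consHead _ _ _ (splitSp_ne_nil rest)]
        simp

theorem splitOn_eq (s : List Char) :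
    PySem.Chars.splitOn s [' '] = splitSp s := by
  unfold PySem.Chars.splitOn
  rw [splitOn_go_eq (s.length + 1) s [] [] (Nat.le_succ _)]
  simp [consHead_nil _ (splitSp_ne_nil s)]

-- splitSp on a non-space head
theorem splitSp_cons_ne {c : Char} (t : List Char) (hc : c ≠ ' ') :
    splitSp (c :: t) = consHead [c] (splitSp t) := by
  simp only [splitSp, if_neg hc]
  cases h : splitSp t <;> simp [consHead]

-- String-level facts shared by both filter conditions
theorem str_empty_eq (s : String) : decide (s = "") = decide (s.toList = []) :=
  decide_eq_decide.mpr (by rw [← String.toList_inj]; simp)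

theorem str_isIn_dot (s : String) : PySem.Str.isIn "." s = s.toList.contains '.' := by
  by_cases h : '.' ∈ s.toList
  · have ha : PySem.Chars.isIn ['.'] s.toList = true :=
      (PySem.Chars.isIn_iff_infix _ _).mpr ((List.singleton_infix_iff _ _).mpr h)
    simp [ha, h]
  · have ha : PySem.Chars.isIn ['.'] s.toList = false :=
      (PySem.Chars.isIn_eq_false_iff _ _).mpr
        (fun hin => h ((List.singleton_infix_iff _ _).mp hin))
    simp [ha, h]

theorem str_get0_eq (s : String) :
    PySem.Str.pyGet? s 0 = s.toList.head? := by
  simp [List.head?_eq_getElem?, PySem.List.pyGet?_zero]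

theorem str_getm1_eq (s : String) :
    PySem.Str.pyGet? s (-1) = s.toList.getLast? := by
  simp [PySem.List.pyGet?_neg_one]

theorem str_ends_eq (s : String) :
    PySem.Str.endswith s "\n" = decide (s.toList.getLast? = some '\n') := by
  by_cases h : s.toList.getLast? = some '\n'
  · obtain ⟨l', hl⟩ := List.getLast?_eq_some_iff.mp h
    have ha : PySem.Chars.endswith s.toList ['\n'] = true :=
      (PySem.Chars.endswith_iff _ _).mpr ⟨l', hl.symm⟩
    simp [ha, h]
  · have ha : PySem.Chars.endswith s.toList ['\n'] = false := by
      rw [Bool.eq_false_iff]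
      intro hb
      obtain ⟨l', hl⟩ := (PySem.Chars.endswith_iff _ _).mp hb
      exact h (List.getLast?_eq_some_iff.mpr ⟨l', hl.symm⟩)
    simp [ha, h]

-- A's filter condition, on a String, is `keep` of its char list
theorem cond_eq_keep (s : String) :
    (!(decide (s = "") || PySem.Str.isIn "." s ||
       decide (PySem.Str.pyGet? s 0 = some '$') ||
       decide (PySem.Str.pyGet? s (-1) = some '\n'))) = keep s.toList := by
  unfold keep
  rw [str_empty_eq, str_isIn_dot, str_get0_eq, str_getm1_eq]
  simp [Bool.not_or, decide_not]

-- B's pvFlush appends exactly the kept token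
theorem pvFlush_eq (moves : List String) (buf : List Char) :
    pvFlush moves buf = moves ++ (if keep buf then [String.ofList buf] else []) := by
  have he : decide (String.ofList buf ≠ "") = decide (buf ≠ []) :=
    decide_eq_decide.mpr (not_congr (by rw [← String.toList_inj]; simp))
  simp only [pvFlush, keep, he, str_isIn_dot, str_get0_eq, str_ends_eq,
    String.toList_ofList, decide_not]
  split <;> simp

-- B's scan, in terms of stripP / splitSp / keep
theorem pvScan_eq (l : List Char) : ∀ (inC : Bool) (buf : List Char) (moves : List String),
    pvScan l inC buf moves
    = moves ++ ((consHead buf (splitSp (stripP l inC))).filter keep).map String.ofList := by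
  induction l with
  | nil =>
    intro inC buf moves
    simp only [pvScan, stripP, splitSp, consHead, List.append_nil, pvFlush_eq]
    split <;> simp_all
  | cons ch t ih =>
    intro inC buf moves
    by_cases h1 : ch = '{'
    · subst h1
      have hs : stripP ('{' :: t) inC = stripP t true := by
        simp [stripP, show ¬('{' = '}') from by decide]
      simp only [pvScan, if_true, hs, ih]
    · by_cases h2 : inC = true
      · subst h2
        have hs : stripP (ch :: t) true = stripP t (!decide (ch = '}')) := by
          by_cases h3 : ch = '}' <;> simp [stripP, h1, h3]
        simp only [pvScan, if_neg h1, if_true, hs, ih]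
      · simp only [Bool.not_eq_true] at h2
        subst h2
        have hs : stripP (ch :: t) false = ch :: stripP t false := by
          by_cases h3 : ch = '}' <;> simp [stripP, h1, h3]
        by_cases h3 : ch = ' '
        · subst h3
          simp only [pvScan, if_neg h1, Bool.false_eq_true, if_false, if_true, ih, hs]
          rw [show splitSp (' ' :: stripP t false) = [] :: splitSp (stripP t false) from by
            simp [splitSp]]
          rw [consHead_nil _ (splitSp_ne_nil _), pvFlush_eq]
          simp only [consHead, List.filter_cons, List.append_assoc]
          split <;> simp_all
        · simp only [pvScan, if_neg h1, Bool.false_eq_true, if_false, if_neg h3, ih, hs]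
          rw [splitSp_cons_ne _ h3, consHead_consHead _ _ _ (splitSp_ne_nil _)]

-- enumerate-fold of A's filter loop
theorem foldl_enum_filter (toks : List String) : ∀ (s : Int) (acc : List String),
    (PySem.List.enumerate toks s).foldl
      (fun moves (p : Int × String) =>
        if !(decide (p.2 = "") || PySem.Str.isIn "." p.2 ||
             decide (PySem.Str.pyGet? p.2 0 = some '$') ||
             decide (PySem.Str.pyGet? p.2 (-1) = some '\n'))
        then moves ++ [p.2] else moves) acc
    = acc ++ (toks.filter (fun t => keep t.toList)) := by
  induction toks with
  | nil => intro s acc; simp [PySem.List.enumerate_nil]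
  | cons x xs ih =>
    intro s acc
    rw [PySem.List.enumerate_cons, List.foldl_cons]
    simp only [cond_eq_keep x]
    rw [ih]
    simp only [List.filter_cons]
    split <;> simp_all

-- ===== VERDICT (by name: the statement is the Claim_ definition above) =====
theorem read_evaluations_spec : Claim_equal_read_evaluations := by
  intro line _
  unfold Spec_read_evaluations read_evaluations read_evaluations_alt
  rw [foldA_eq, pvScan_eq]
  rw [consHead_nil _ (splitSp_ne_nil _)]
  simp only [PySem.Str.split?, PySem.Chars.split?, show (" " : String).toList = [' '] from rfl,
    List.isEmpty_cons, Bool.false_eq_true, if_false, Option.map_some, Option.getD_some,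
    String.toList_append, String.toList_ofList, show ("" : String).toList = [] from rfl,
    List.nil_append]
  rw [splitOn_eq, foldl_enum_filter]
  rw [List.filter_map]
  simp [Function.comp_def]
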